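-- pv_equiv track=rewrite | github.com/Colin0817/727-final-project | data-analysis/YouTube-combine/clean_analysis.py | classify_type
-- ===== SOURCE A (Python) =====
-- def classify_type(objects_in_comment):
--     chatgpt_keywords = ["ChatGPT", "gpt", "open ai", "openai", "chatgtp"]
--     claude_keywords = ["Claude", "sonnet", "claudeai"]
--
--     # Determining if a comment contains both chatgpt and claude keywords
--     if any(obj in chatgpt_keywords for obj in objects_in_comment) and any(
--         obj in claude_keywords for obj in objects_in_comment
--     ):
--         return "both"
--     elif any(obj in ["both", "none"] for obj in objects_in_comment):
--         return "both"
--     elif any(obj in chatgpt_keywords for obj in objects_in_comment):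
--         return "chatgpt"
--     elif any(obj in claude_keywords for obj in objects_in_comment):
--         return "claude"
--     else:
--         return "none"
-- ===== SOURCE B (Python) =====
-- def classify_type(objects_in_comment):
--     has_gpt = has_claude = has_bothnone = False
--     for obj in objects_in_comment:
--         if obj in ("ChatGPT", "gpt", "open ai", "openai", "chatgtp"):
--             has_gpt = True
--         elif obj in ("Claude", "sonnet", "claudeai"):
--             has_claude = True
--         elif obj in ("both", "none"):
--             has_bothnone = True
--     if has_gpt and has_claude:
--         return "both"
--     if has_bothnone:
--         return "both"
--     if has_gpt:
--         return "chatgpt"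
--     if has_claude:
--         return "claude"
--     return "none"
-- ===== Notes on version B (the rewrite author's own statement) =====
-- stated objective: simpler
-- what changed: Replaced four independent any() scans of the list with a single pass maintaining three booleans, followed by the same priority cascade.
import Mathlib
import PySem

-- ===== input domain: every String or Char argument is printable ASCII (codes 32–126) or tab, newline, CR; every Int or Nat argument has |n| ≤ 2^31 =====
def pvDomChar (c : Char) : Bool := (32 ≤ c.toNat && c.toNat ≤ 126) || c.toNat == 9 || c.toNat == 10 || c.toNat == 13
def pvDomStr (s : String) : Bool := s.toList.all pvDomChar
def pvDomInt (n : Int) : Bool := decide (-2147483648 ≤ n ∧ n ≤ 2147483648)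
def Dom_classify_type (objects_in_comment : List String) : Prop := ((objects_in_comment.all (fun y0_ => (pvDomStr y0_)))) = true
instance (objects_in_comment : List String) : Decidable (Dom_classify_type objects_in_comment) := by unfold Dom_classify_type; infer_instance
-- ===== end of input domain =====

-- B replaces A's four independent any() scans of the list with one pass keeping three booleans (simpler, one traversal).

-- ===== PORT A =====
def pvGptKw : List String := ["ChatGPT", "gpt", "open ai", "openai", "chatgtp"]
def pvClaudeKw : List String := ["Claude", "sonnet", "claudeai"]

def classify_type (objects_in_comment : List String) : String :=
  if (objects_in_comment.any (fun obj => obj ∈ pvGptKw)) &&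
     (objects_in_comment.any (fun obj => obj ∈ pvClaudeKw)) then
    "both"
  else if objects_in_comment.any (fun obj => obj ∈ (["both", "none"] : List String)) then
    "both"
  else if objects_in_comment.any (fun obj => obj ∈ pvGptKw) then
    "chatgpt"
  else if objects_in_comment.any (fun obj => obj ∈ pvClaudeKw) then
    "claude"
  else
    "none"

-- ===== PORT B =====
-- single pass: fold maintaining (has_gpt, has_claude, has_bothnone)
def classifyScan (objects_in_comment : List String) : Bool × Bool × Bool :=
  objects_in_comment.foldl
    (fun st obj =>
      if obj ∈ pvGptKw then (true, st.2.1, st.2.2)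
      else if obj ∈ pvClaudeKw then (st.1, true, st.2.2)
      else if obj ∈ (["both", "none"] : List String) then (st.1, st.2.1, true)
      else st)
    (false, false, false)

def classify_type_alt (objects_in_comment : List String) : String :=
  let st := classifyScan objects_in_comment
  if st.1 && st.2.1 then "both"
  else if st.2.2 then "both"
  else if st.1 then "chatgpt"
  else if st.2.1 then "claude"
  else "none"

-- ===== PRECONDITION & SPEC =====
def Spec_classify_type (objects_in_comment : List String) (out : String) : Prop := out = classify_type_alt objects_in_comment
instance (objects_in_comment : List String) (out : String) : Decidable (Spec_classify_type objects_in_comment out) := by unfold Spec_classify_type; infer_instance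

-- ===== CLAIM (what is proved, stated in full; the proofs are below) =====
def Claim_equal_classify_type : Prop := ∀ (objects_in_comment : List String), Dom_classify_type objects_in_comment → Spec_classify_type objects_in_comment (classify_type objects_in_comment)

-- ===== LEMMAS AND PROOFS =====

-- the fold computes exactly the three any-scans A performs
theorem classifyScan_eq (l : List String) (g c b : Bool) :
    l.foldl
      (fun st obj =>
        if obj ∈ pvGptKw then (true, st.2.1, st.2.2)
        else if obj ∈ pvClaudeKw then (st.1, true, st.2.2)
        else if obj ∈ (["both", "none"] : List String) then (st.1, st.2.1, true)
        else st)
      (g, c, b)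
    = (g || l.any (fun obj => obj ∈ pvGptKw),
       c || l.any (fun obj => obj ∈ pvClaudeKw),
       b || l.any (fun obj => obj ∈ (["both", "none"] : List String))) := by
  induction l generalizing g c b with
  | nil => simp
  | cons x xs ih =>
    rw [List.foldl_cons, List.any_cons, List.any_cons, List.any_cons]
    by_cases hg : x ∈ pvGptKw
    · have hg' := hg
      simp only [pvGptKw, List.mem_cons, List.not_mem_nil, or_false] at hg'
      have hc : x ∉ pvClaudeKw := by
        rcases hg' with h | h | h | h | h <;> simp [h, pvClaudeKw]
      have hb : x ∉ (["both", "none"] : List String) := by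
        rcases hg' with h | h | h | h | h <;> simp [h]
      rw [if_pos hg, ih]
      simp [hg, hc, hb]
    · rw [if_neg hg]
      by_cases hc : x ∈ pvClaudeKw
      · have hc' := hc
        simp only [pvClaudeKw, List.mem_cons, List.not_mem_nil, or_false] at hc'
        have hb : x ∉ (["both", "none"] : List String) := by
          rcases hc' with h | h | h <;> simp [h]
        rw [if_pos hc, ih]
        simp [hg, hc, hb]
      · rw [if_neg hc]
        by_cases hb : x ∈ (["both", "none"] : List String)
        · rw [if_pos hb, ih]
          simp [hg, hc, hb]
        · rw [if_neg hb, ih]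
          simp [hg, hc, hb]

-- ===== VERDICT (by name: the statement is the Claim_ definition above) =====
theorem classify_type_spec : Claim_equal_classify_type := by
  intro l _
  unfold Spec_classify_type classify_type classify_type_alt classifyScan
  rw [classifyScan_eq]
  simp only [Bool.false_or]
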